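-- pv_equiv track=rewrite | github.com/nunoinfante/SO | projeto_2/pgrepwc_processos_2.py | get_size_process
-- ===== SOURCE A (Python) =====
-- def get_size_process(tarefas, dict):
--     res = []
--     for p in tarefas:
--         counter = 0
--         if len(p) == 0:
--             res.append(0)
--         else:
--             for f in p:
--                 counter += dict.get(f)
--             res.append(counter)
--     return res.index(min(res))
-- ===== SOURCE B (Python) =====
-- def get_size_process(tarefas, dict):
--     best_total = None
--     best_index = -1
--     for i, p in enumerate(tarefas):
--         total = 0
--         for f in p:
--             total += dict[f]
--         if best_total is None or total < best_total:
--             best_total = total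
--             best_index = i
--     if best_total is None:
--         raise ValueError("get_size_process: no processes")
--     return best_index
-- ===== Notes on version B (the rewrite author's own statement) =====
-- stated objective: simpler
-- what changed: Single pass keeping a running (best_total, best_index) with strict-< update, instead of building the res list and then scanning it twice with min() and list.index().
import Mathlib
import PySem

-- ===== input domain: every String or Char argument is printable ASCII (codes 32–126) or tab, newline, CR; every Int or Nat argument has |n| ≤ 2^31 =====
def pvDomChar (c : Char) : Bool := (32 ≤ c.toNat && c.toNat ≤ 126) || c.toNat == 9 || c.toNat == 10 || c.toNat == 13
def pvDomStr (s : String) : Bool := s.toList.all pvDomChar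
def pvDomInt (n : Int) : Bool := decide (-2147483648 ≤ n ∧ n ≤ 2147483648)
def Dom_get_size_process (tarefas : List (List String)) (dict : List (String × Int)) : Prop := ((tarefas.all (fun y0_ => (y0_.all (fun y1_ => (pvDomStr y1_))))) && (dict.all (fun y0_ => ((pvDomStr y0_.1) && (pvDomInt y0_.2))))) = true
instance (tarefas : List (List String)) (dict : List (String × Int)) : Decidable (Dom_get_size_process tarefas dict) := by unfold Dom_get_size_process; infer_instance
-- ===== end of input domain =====

-- B replaces A's res-list + min() + list.index() with one pass tracking (best_total, best_index); same value, simpler.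


-- ===== PORT A =====
-- dict.get(f): first match in the association list; 0 stands for the None that makes
-- Python's '+=' raise TypeError — those inputs are excluded by Pre_get_size_process.
def pvGet (dict : List (String × Int)) (f : String) : Int :=
  match dict.find? (fun kv => kv.1 == f) with
  | some kv => kv.2
  | none => 0

def get_size_process (tarefas : List (List String)) (dict : List (String × Int)) : Int :=
  let res := tarefas.foldl (fun res p =>
    if p.length == 0 then res ++ [(0 : Int)]
    else res ++ [p.foldl (fun counter f => counter + pvGet dict f) 0]) []
  match PySem.List.min? res (fun x => x) with
  | none => 0   -- min([]) raises ValueError; excluded by Pre_get_size_process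
  | some m =>
    match PySem.List.index? res m with
    | some i => (i : Int)
    | none => 0   -- unreachable: min is a member

-- ===== PORT B =====
def get_size_process_alt (tarefas : List (List String)) (dict : List (String × Int)) : Int :=
  let st := tarefas.foldl (fun (st : Int × Option Int × Int) p =>
      let total := p.foldl (fun total f => total + pvGet dict f) 0
      match st.2.1 with
      | none => (st.1 + 1, some total, st.1)
      | some b =>
        if total < b then (st.1 + 1, some total, st.1)
        else (st.1 + 1, st.2.1, st.2.2)) ((0 : Int), (none : Option Int), (-1 : Int))
  st.2.2   -- best_total is None ↔ tarefas = [], where Python B raises ValueError (outside Pre_)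

-- ===== PRECONDITION & SPEC =====
-- Pre_ excludes exactly where Python A raises: tarefas = [] (min([]) → ValueError) and any
-- file name missing from dict (dict.get(f) is None, so '+=' → TypeError).
def Pre_get_size_process (tarefas : List (List String)) (dict : List (String × Int)) : Prop :=
  tarefas ≠ [] ∧ ∀ p ∈ tarefas, ∀ f ∈ p, (dict.find? (fun kv => kv.1 == f)).isSome
instance (tarefas : List (List String)) (dict : List (String × Int)) : Decidable (Pre_get_size_process tarefas dict) := by unfold Pre_get_size_process; infer_instance

def pvWitness_get_size_process : List (List String) × (List (String × Int)) :=
  ([["a"], [], ["a", "b"]], [("a", 3), ("b", -1)])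

def Spec_get_size_process (tarefas : List (List String)) (dict : List (String × Int)) (out : Int) : Prop := out = get_size_process_alt tarefas dict
instance (tarefas : List (List String)) (dict : List (String × Int)) (out : Int) : Decidable (Spec_get_size_process tarefas dict out) := by unfold Spec_get_size_process; infer_instance

-- ===== CLAIM (what is proved, stated in full; the proofs are below) =====
def Claim_equal_get_size_process : Prop := ∀ (tarefas : List (List String)) (dict : List (String × Int)), Dom_get_size_process tarefas dict → Pre_get_size_process tarefas dict → Spec_get_size_process tarefas dict (get_size_process tarefas dict)

-- ===== LEMMAS AND PROOFS =====

-- B's loop once the state carries 'some b': i = next index, b = best total, j = best index.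
def amin : List Int → Int → Int → Int → Int
  | [], _, _, j => j
  | t :: ts, i, b, j => if t < b then amin ts (i + 1) t i else amin ts (i + 1) b j

theorem foldl_eq_amin (dict : List (String × Int)) (ps : List (List String)) (i b j : Int) :
    (ps.foldl (fun (st : Int × Option Int × Int) p =>
      match st.2.1 with
      | none => (st.1 + 1, some (p.foldl (fun total f => total + pvGet dict f) 0), st.1)
      | some b =>
        if p.foldl (fun total f => total + pvGet dict f) 0 < b then
          (st.1 + 1, some (p.foldl (fun total f => total + pvGet dict f) 0), st.1)
        else (st.1 + 1, st.2.1, st.2.2)) (i, some b, j)).2.2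
      = amin (ps.map (fun p => p.foldl (fun total f => total + pvGet dict f) 0)) i b j := by
  induction ps generalizing i b j with
  | nil => rfl
  | cons p ps ih =>
    simp only [List.foldl_cons, List.map_cons, amin]
    split
    · exact ih _ _ _
    · exact ih _ _ _

theorem altB (dict : List (String × Int)) (q : List String) (qs : List (List String)) :
    get_size_process_alt (q :: qs) dict
      = amin (qs.map (fun p => p.foldl (fun total f => total + pvGet dict f) 0)) 1
          (q.foldl (fun total f => total + pvGet dict f) 0) 0 := by
  unfold get_size_process_alt
  simp only [List.foldl_cons]
  rw [foldl_eq_amin, zero_add]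

theorem amin_eq (ts : List Int) (i b j : Int) :
    amin ts i b j =
      if _h : ts.foldl min b < b then
        i + ((PySem.List.index? ts (ts.foldl min b)).getD 0 : Nat)
      else j := by
  induction ts generalizing i b j with
  | nil => simp [amin]
  | cons t ts ih =>
    simp only [amin, List.foldl_cons]
    by_cases ht : t < b
    · rw [if_pos ht, min_eq_right ht.le, ih]
      have hm : ts.foldl min t < b := lt_of_le_of_lt (PySem.List.foldl_min_le ts t).1 ht
      rw [dif_pos hm]
      by_cases hlt : ts.foldl min t < t
      · rw [dif_pos hlt]
        have hmem : ts.foldl min t ∈ ts := by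
          rcases PySem.List.foldl_min_mem ts t with h | h
          · omega
          · exact h
        have hne : t ≠ ts.foldl min t := by omega
        rw [PySem.List.index?_cons_of_ne ts hne]
        obtain ⟨k, hk⟩ := Option.isSome_iff_exists.1 ((PySem.List.index?_isSome_iff ts _).2 hmem)
        rw [hk]
        simp
        ring
      · rw [dif_neg hlt]
        have heq : ts.foldl min t = t :=
          le_antisymm (PySem.List.foldl_min_le ts t).1 (by omega)
        rw [heq, PySem.List.index?_cons_self]
        simp
    · rw [if_neg ht, min_eq_left (not_lt.1 ht), ih]
      by_cases hm : ts.foldl min b < b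
      · rw [dif_pos hm, dif_pos hm]
        have hmem : ts.foldl min b ∈ ts := by
          rcases PySem.List.foldl_min_mem ts b with h | h
          · omega
          · exact h
        have hne : t ≠ ts.foldl min b := by omega
        rw [PySem.List.index?_cons_of_ne ts hne]
        obtain ⟨k, hk⟩ := Option.isSome_iff_exists.1 ((PySem.List.index?_isSome_iff ts _).2 hmem)
        rw [hk]
        simp
        ring
      · rw [dif_neg hm, dif_neg hm]

-- A's res list is the map of per-process totals (the empty branch appends 0 = the empty fold).
theorem res_eq_map (dict : List (String × Int)) (ps : List (List String)) (acc : List Int) :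
    (ps.foldl (fun res p =>
      if p.length == 0 then res ++ [(0 : Int)]
      else res ++ [p.foldl (fun counter f => counter + pvGet dict f) 0]) acc)
    = acc ++ ps.map (fun p => p.foldl (fun counter f => counter + pvGet dict f) 0) := by
  have : (fun (res : List Int) (p : List String) =>
      if p.length == 0 then res ++ [(0 : Int)]
      else res ++ [p.foldl (fun counter f => counter + pvGet dict f) 0])
      = fun res p => res ++ [p.foldl (fun counter f => counter + pvGet dict f) 0] := by
    funext res p
    cases p <;> simp
  rw [this, PySem.List.foldl_append_singleton_eq_map]

-- ===== VERDICT (by name: the statement is the Claim_ definition above) =====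
theorem get_size_process_spec : Claim_equal_get_size_process := by
  intro tarefas dict _ hpre
  unfold Spec_get_size_process
  obtain ⟨hne, -⟩ := hpre
  cases tarefas with
  | nil => exact absurd rfl hne
  | cons q qs =>
    rw [altB, amin_eq]
    unfold get_size_process
    simp only [res_eq_map, List.nil_append, List.map_cons]
    set t := q.foldl (fun counter f => counter + pvGet dict f) 0 with ht
    set ts := qs.map (fun p => p.foldl (fun counter f => counter + pvGet dict f) 0) with hts
    rw [PySem.List.min?_id_cons]
    by_cases hm : ts.foldl min t < t
    · rw [dif_pos hm]
      have hmem : ts.foldl min t ∈ ts := by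
        rcases PySem.List.foldl_min_mem ts t with h | h
        · omega
        · exact h
      have hne' : t ≠ ts.foldl min t := by omega
      obtain ⟨k, hk⟩ := Option.isSome_iff_exists.1 ((PySem.List.index?_isSome_iff ts _).2 hmem)
      simp only [PySem.List.index?_cons_of_ne ts hne', hk, Option.map_some, Option.getD_some]
      push_cast
      ring
    · rw [dif_neg hm]
      have heq : ts.foldl min t = t :=
        le_antisymm (PySem.List.foldl_min_le ts t).1 (by omega)
      simp only [heq, PySem.List.index?_cons_self, Nat.cast_zero]
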